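-- pv_equiv track=rewrite | github.com/bakog/codingbat | warmup2/string_match.py | string_match_original
-- ===== SOURCE A (Python) =====
-- def string_match_original(a, b):
--     # Figure which string is shorter.
--     shorter = min(len(a), len(b))
--     count = 0
--
--     # Loop i over every substring starting spot.
--     # Use length-1 here, so can use char str[i+1] in the loop
--     for i in range(shorter - 1):
--         a_sub = a[i:i + 2]
--         b_sub = b[i:i + 2]
--         if a_sub == b_sub:
--             count = count + 1
--
--     return count
-- ===== SOURCE B (Python) =====
-- def string_match_original(a, b):
--     n = min(len(a), len(b))
--     m = [a[i] == b[i] for i in range(n)]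
--     return sum(1 for i in range(n - 1) if m[i] and m[i + 1])
-- ===== Notes on version B (the rewrite author's own statement) =====
-- stated objective: alternative
-- what changed: Replaces the slice-building-and-comparison loop by two passes: first a boolean per-position equality table, then a count of adjacent True pairs in that table (no substrings are ever built).
import Mathlib
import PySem

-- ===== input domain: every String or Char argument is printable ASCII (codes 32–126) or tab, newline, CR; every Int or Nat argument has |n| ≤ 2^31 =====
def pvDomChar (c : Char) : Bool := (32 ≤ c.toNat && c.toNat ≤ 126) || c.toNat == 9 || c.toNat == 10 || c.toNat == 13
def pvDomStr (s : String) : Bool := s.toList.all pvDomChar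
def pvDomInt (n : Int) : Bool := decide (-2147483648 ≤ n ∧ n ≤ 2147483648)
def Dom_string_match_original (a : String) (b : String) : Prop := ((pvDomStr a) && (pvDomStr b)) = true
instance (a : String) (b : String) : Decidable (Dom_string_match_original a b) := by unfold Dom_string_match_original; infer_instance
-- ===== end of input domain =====

-- B replaces the slice-comparison loop by a per-position boolean equality table plus
-- an adjacent-pair count over that table (objective: alternative decomposition).


-- ===== PORT A =====
def string_match_original (a : String) (b : String) : Int :=
  let la := a.toList
  let lb := b.toList
  let shorter : Int := min la.length lb.length
  (PySem.List.pyRange 0 (shorter - 1) 1).foldl (fun count i =>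
    let a_sub := PySem.List.slice la (some i) (some (i + 2))
    let b_sub := PySem.List.slice lb (some i) (some (i + 2))
    if a_sub == b_sub then count + 1 else count) 0

-- ===== PORT B =====
def string_match_original_alt (a : String) (b : String) : Int :=
  let la := a.toList
  let lb := b.toList
  let n : Int := min la.length lb.length
  let m := (PySem.List.pyRange 0 n 1).map
    (fun i => PySem.List.pyGetD la i ' ' == PySem.List.pyGetD lb i ' ')
  ((PySem.List.pyRange 0 (n - 1) 1).map (fun i =>
      if PySem.List.pyGetD m i false && PySem.List.pyGetD m (i + 1) false then (1 : Int) else 0)).sum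

-- ===== PRECONDITION & SPEC =====
def Spec_string_match_original (a : String) (b : String) (out : Int) : Prop := out = string_match_original_alt a b
instance (a : String) (b : String) (out : Int) : Decidable (Spec_string_match_original a b out) := by unfold Spec_string_match_original; infer_instance

-- ===== CLAIM (what is proved, stated in full; the proofs are below) =====
def Claim_equal_string_match_original : Prop := ∀ (a : String) (b : String), Dom_string_match_original a b → Spec_string_match_original a b (string_match_original a b)

-- ===== LEMMAS AND PROOFS =====

-- counting fold = sum of a 0/1 map, given pointwise agreement of the tests
theorem pv_foldl_if_eq_sum {α : Type} (L : List α) (p q : α → Bool)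
    (h : ∀ i ∈ L, p i = q i) (c : Int) :
    L.foldl (fun c i => if p i then c + 1 else c) c
      = c + (L.map (fun i => if q i then (1 : Int) else 0)).sum := by
  induction L generalizing c with
  | nil => simp
  | cons x xs ih =>
    have hx := h x (by simp)
    simp only [List.foldl_cons, List.map_cons, List.sum_cons]
    rw [ih (fun i hi => h i (by simp [hi]))]
    rw [hx]
    by_cases hq : q x
    · simp [hq]; ring
    · simp [hq]

theorem pv_take_two_drop {α : Type} (l : List α) (k : Nat) (h : k + 1 < l.length) :
    (l.drop k).take 2 = [l[k], l[k + 1]] := by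
  rw [List.drop_eq_getElem_cons (by omega), List.drop_eq_getElem_cons h]
  rfl

theorem pv_main : ∀ (a b : String), Spec_string_match_original a b (string_match_original a b) := by
  intro a b
  unfold Spec_string_match_original string_match_original string_match_original_alt
  simp only []
  set la := a.toList with hla
  set lb := b.toList with hlb
  set n : Int := min la.length lb.length with hn
  refine (pv_foldl_if_eq_sum _ _ _ ?_ 0).trans (zero_add _)
  intro i hi
  have hmem := (PySem.List.mem_pyRange_one (a := 0) (b := n - 1) (x := i)).1 hi
  obtain ⟨hi0, hilt⟩ := hmem
  -- i as a Nat
  obtain ⟨k, hk⟩ : ∃ k : Nat, i = (k : Int) := ⟨i.toNat, (Int.toNat_of_nonneg hi0).symm⟩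
  subst hk
  have hkla : k + 1 < la.length := by
    have : (k : Int) < (min la.length lb.length : Int) - 1 := hilt
    omega
  have hklb : k + 1 < lb.length := by
    have : (k : Int) < (min la.length lb.length : Int) - 1 := hilt
    omega
  -- slices are the two-element windows
  have hsa : PySem.List.slice la (some (k : Int)) (some ((k : Int) + 2))
      = [la[k], la[k + 1]] := by
    have := PySem.List.slice_natCast_add (xs := la) (j := k) (n := 2)
    simpa [pv_take_two_drop la k hkla] using this
  have hsb : PySem.List.slice lb (some (k : Int)) (some ((k : Int) + 2))
      = [lb[k], lb[k + 1]] := by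
    have := PySem.List.slice_natCast_add (xs := lb) (j := k) (n := 2)
    simpa [pv_take_two_drop lb k hklb] using this
  -- table lookups
  have hm1 : PySem.List.pyGetD
      ((PySem.List.pyRange 0 n 1).map
        (fun i => PySem.List.pyGetD la i ' ' == PySem.List.pyGetD lb i ' '))
      (k : Int) false
      = (PySem.List.pyGetD la (k : Int) ' ' == PySem.List.pyGetD lb (k : Int) ' ') := by
    exact PySem.List.pyGetD_map_pyRange_of_nonneg _ n (k : Int) false (by omega) (by omega)
  have hm2 : PySem.List.pyGetD
      ((PySem.List.pyRange 0 n 1).map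
        (fun i => PySem.List.pyGetD la i ' ' == PySem.List.pyGetD lb i ' '))
      ((k : Int) + 1) false
      = (PySem.List.pyGetD la ((k : Int) + 1) ' ' == PySem.List.pyGetD lb ((k : Int) + 1) ' ') := by
    exact PySem.List.pyGetD_map_pyRange_of_nonneg _ n ((k : Int) + 1) false (by omega) (by omega)
  rw [hsa, hsb, hm1, hm2]
  have g1 : PySem.List.pyGetD la (k : Int) ' ' = la[k] :=
    PySem.List.pyGetD_ofNat _ _ _ (by omega)
  have g2 : PySem.List.pyGetD lb (k : Int) ' ' = lb[k] :=
    PySem.List.pyGetD_ofNat _ _ _ (by omega)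
  have g3 : PySem.List.pyGetD la ((k : Int) + 1) ' ' = la[k + 1] := by
    have : ((k : Int) + 1) = ((k + 1 : Nat) : Int) := by push_cast; ring
    rw [this]; exact PySem.List.pyGetD_ofNat _ _ _ hkla
  have g4 : PySem.List.pyGetD lb ((k : Int) + 1) ' ' = lb[k + 1] := by
    have : ((k : Int) + 1) = ((k + 1 : Nat) : Int) := by push_cast; ring
    rw [this]; exact PySem.List.pyGetD_ofNat _ _ _ hklb
  rw [g1, g2, g3, g4]
  cases h1 : la[k] == lb[k] <;> cases h2 : la[k+1] == lb[k+1] <;>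
    simp [List.cons_beq_cons, h1, h2]

-- ===== VERDICT (by name: the statement is the Claim_ definition above) =====
theorem string_match_original_spec : Claim_equal_string_match_original :=
  fun a b _ => pv_main a b
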